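-- pv_equiv track=rewrite | github.com/Racine-04/Advent-of-Code | 2024/Day5.py | order_list
-- ===== SOURCE A (Python) =====
-- def order_list(nums, order):
--     printed = []
--     for num in nums:
--         minimum = 100000000000
--         befores = order.get(num, [])
--         for before in befores:
--             if before in printed:
--                 # get the smallest index and put if before
--                 minimum = min(minimum, printed.index(before))
--
--         if minimum == 100000000000:
--             printed.append(num)
--         else:
--             printed.insert(minimum, num)
--     return printed
-- ===== SOURCE B (Python) =====
-- def order_list(nums, order):
--     printed = []
--     for num in nums:
--         befores = set(order.get(num, []))
--         if befores:
--             for i, p in enumerate(printed):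
--                 if p in befores:
--                     printed.insert(i, num)
--                     break
--             else:
--                 printed.append(num)
--         else:
--             printed.append(num)
--     return printed
-- ===== Notes on version B (the rewrite author's own statement) =====
-- stated objective: idiomatic
-- what changed: Replaces the per-num loop over befores that takes min(printed.index(before)) against a sentinel with a single left-to-right enumerate scan of printed that inserts num before the first element found in a befores set (for/else append), skipping the scan when befores is empty.
import Mathlib
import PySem

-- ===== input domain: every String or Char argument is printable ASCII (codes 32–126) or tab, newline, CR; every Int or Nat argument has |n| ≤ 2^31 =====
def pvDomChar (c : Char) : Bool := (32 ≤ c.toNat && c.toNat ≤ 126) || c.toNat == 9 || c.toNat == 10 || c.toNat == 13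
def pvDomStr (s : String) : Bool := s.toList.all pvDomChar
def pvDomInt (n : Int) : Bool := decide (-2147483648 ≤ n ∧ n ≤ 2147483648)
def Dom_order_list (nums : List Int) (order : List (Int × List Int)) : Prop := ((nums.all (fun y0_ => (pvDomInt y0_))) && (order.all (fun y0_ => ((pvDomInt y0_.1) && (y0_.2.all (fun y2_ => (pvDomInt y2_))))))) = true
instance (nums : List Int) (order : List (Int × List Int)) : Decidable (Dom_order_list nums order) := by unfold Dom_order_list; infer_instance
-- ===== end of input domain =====

-- B replaces A's per-num min-over-befores of printed.index(before) with one left-to-right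
-- scan of printed that inserts at the first element found in a befores set (idiomatic for/else).


-- ===== PORT A =====
def order_list (nums : List Int) (order : List (Int × List Int)) : List Int :=
  nums.foldl (fun printed num =>
    let befores := PySem.Dict.getD (PySem.Dict.mk order) num []
    let minimum := befores.foldl (fun minimum before =>
      if printed.contains before then
        min minimum (((PySem.List.index? printed before).getD 0 : Nat) : Int)
      else minimum) 100000000000
    if minimum = 100000000000 then printed ++ [num]
    else PySem.List.insert printed minimum num) []

-- ===== PORT B =====
-- B helper: scan printed left to right, insert num before the first element of bset, else append (for/else)
def scanInsert (bset : PySem.Set Int) (num : Int) : List Int → List Int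
  | [] => [num]
  | p :: rest => if PySem.Set.contains bset p then num :: p :: rest else p :: scanInsert bset num rest

def order_list_alt (nums : List Int) (order : List (Int × List Int)) : List Int :=
  nums.foldl (fun printed num =>
    let bset := PySem.Set.ofList (PySem.Dict.getD (PySem.Dict.mk order) num [])
    if bset = [] then printed ++ [num] else scanInsert bset num printed) []

-- ===== PRECONDITION & SPEC =====
-- Pre_ excludes only inputs with more than 10^11 elements in nums: there A's sentinel 100000000000
-- can coincide with a genuine insertion index and be misread as "not found"; no physically
-- runnable input reaches that size, so A's value on every reachable input is inside Pre_.
def Pre_order_list (nums : List Int) (order : List (Int × List Int)) : Prop :=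
  nums.length ≤ 100000000000
instance (nums : List Int) (order : List (Int × List Int)) : Decidable (Pre_order_list nums order) := by unfold Pre_order_list; infer_instance
def pvWitness_order_list : List Int × (List (Int × List Int)) := ([2, 1, 3], [(3, [1, 2]), (1, [5])])
def Spec_order_list (nums : List Int) (order : List (Int × List Int)) (out : List Int) : Prop := out = order_list_alt nums order
instance (nums : List Int) (order : List (Int × List Int)) (out : List Int) : Decidable (Spec_order_list nums order out) := by unfold Spec_order_list; infer_instance

-- ===== CLAIM (what is proved, stated in full; the proofs are below) =====
def Claim_equal_order_list : Prop := ∀ (nums : List Int) (order : List (Int × List Int)), Dom_order_list nums order → Pre_order_list nums order → Spec_order_list nums order (order_list nums order)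

-- ===== LEMMAS AND PROOFS =====

-- A's per-element step and B's per-element step, as named functions (defeq to the lambdas in the ports)
def stepA (order : List (Int × List Int)) (printed : List Int) (num : Int) : List Int :=
  let befores := PySem.Dict.getD (PySem.Dict.mk order) num []
  let minimum := befores.foldl (fun minimum before =>
    if printed.contains before then
      min minimum (((PySem.List.index? printed before).getD 0 : Nat) : Int)
    else minimum) 100000000000
  if minimum = 100000000000 then printed ++ [num]
  else PySem.List.insert printed minimum num

def stepB (order : List (Int × List Int)) (printed : List Int) (num : Int) : List Int :=
  let bset := PySem.Set.ofList (PySem.Dict.getD (PySem.Dict.mk order) num [])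
  if bset = [] then printed ++ [num] else scanInsert bset num printed

-- the Int value A reads as printed.index(b) (total form; used only under b ∈ printed)
def pvIdx (printed : List Int) (b : Int) : Int := (((PySem.List.index? printed b).getD 0 : Nat) : Int)

-- A's inner min-fold
def minFold (printed : List Int) (s : Int) (befores : List Int) : Int :=
  befores.foldl (fun m b =>
    if printed.contains b then min m (((PySem.List.index? printed b).getD 0 : Nat) : Int) else m) s

lemma minFold_cons (printed : List Int) (s b : Int) (bs : List Int) :
    minFold printed s (b :: bs)
      = minFold printed (if printed.contains b then min s (pvIdx printed b) else s) bs := rfl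

lemma minFold_le_init (printed : List Int) : ∀ (befores : List Int) (s : Int),
    minFold printed s befores ≤ s := by
  intro befores
  induction befores with
  | nil => intro s; simp [minFold]
  | cons b bs ih =>
    intro s
    rw [minFold_cons]
    split
    · exact le_trans (ih _) (min_le_left _ _)
    · exact ih s

lemma minFold_cases (printed : List Int) : ∀ (befores : List Int) (s : Int),
    minFold printed s befores = s ∨
      ∃ b ∈ befores, b ∈ printed ∧ minFold printed s befores = pvIdx printed b := by
  intro befores
  induction befores with
  | nil => intro s; left; simp [minFold]
  | cons b bs ih =>
    intro s
    rw [minFold_cons]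
    by_cases hb : printed.contains b
    · simp only [hb, if_true]
      rcases ih (min s (pvIdx printed b)) with h | ⟨b', hb', hp', h⟩
      · rcases le_total s (pvIdx printed b) with hle | hle
        · left; rw [h, min_eq_left hle]
        · right
          exact ⟨b, List.mem_cons_self, List.contains_iff_mem.mp hb, by rw [h, min_eq_right hle]⟩
      · right; exact ⟨b', List.mem_cons_of_mem _ hb', hp', h⟩
    · simp only [hb]
      rcases ih s with h | ⟨b', hb', hp', h⟩
      · left; exact h
      · right; exact ⟨b', List.mem_cons_of_mem _ hb', hp', h⟩

lemma minFold_le_mem (printed : List Int) : ∀ (befores : List Int) (s b : Int),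
    b ∈ befores → b ∈ printed → minFold printed s befores ≤ pvIdx printed b := by
  intro befores
  induction befores with
  | nil => intro s b h; cases h
  | cons b' bs ih =>
    intro s b hmem hp
    rw [minFold_cons]
    rcases List.mem_cons.mp hmem with rfl | hmem'
    · rw [if_pos (List.contains_iff_mem.mpr hp)]
      exact le_trans (minFold_le_init _ _ _) (min_le_right _ _)
    · split
      · exact ih _ _ hmem' hp
      · exact ih _ _ hmem' hp

-- the first occurrence of a value satisfying q, read through printed.index
lemma pvIdx_first (printed : List Int) (q : Int → Bool) (k : Nat)
    (hk : k < printed.length) (h1 : q printed[k])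
    (hmin : ∀ j (hj : j < k), ¬ q printed[j] = true) :
    pvIdx printed printed[k] = (k : Int) ∧
      ∀ b ∈ printed, q b → (k : Int) ≤ pvIdx printed b := by
  have key : ∀ b ∈ printed, q b → ∃ j, PySem.List.index? printed b = some j ∧ k ≤ j := by
    intro b hb hq
    obtain ⟨j, hj⟩ := Option.isSome_iff_exists.mp ((PySem.List.index?_isSome_iff printed b).mpr hb)
    obtain ⟨hjlt, hval, hne⟩ := PySem.List.getElem_of_index?_eq_some hj
    refine ⟨j, hj, ?_⟩
    by_contra hlt
    exact hmin j (by omega) (by rw [hval]; exact hq)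
  constructor
  · have hbmem : printed[k] ∈ printed := List.getElem_mem hk
    obtain ⟨j, hj, hkj⟩ := key _ hbmem h1
    obtain ⟨hjlt, hval, hne⟩ := PySem.List.getElem_of_index?_eq_some hj
    have hjk : j = k := by
      by_contra hneq
      exact hne k (by omega) rfl
    subst hjk
    simp only [pvIdx, hj, Option.getD_some]
  · intro b hb hq
    obtain ⟨j, hj, hkj⟩ := key b hb hq
    simp only [pvIdx, hj, Option.getD_some]
    exact_mod_cast hkj

lemma scanInsert_eq (bset : PySem.Set Int) (num : Int) : ∀ printed : List Int,
    scanInsert bset num printed =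
      match printed.findIdx? (fun x => decide (x ∈ bset)) with
      | none => printed ++ [num]
      | some k => printed.take k ++ num :: printed.drop k := by
  intro printed
  induction printed with
  | nil => simp [scanInsert]
  | cons p rest ih =>
    rw [List.findIdx?_cons]
    by_cases hq : p ∈ bset
    · simp [scanInsert, hq]
    · cases hrest : rest.findIdx? (fun x => decide (x ∈ bset)) with
      | none => rw [hrest] at ih; simp [scanInsert, hq, ih]
      | some k => rw [hrest] at ih; simp [scanInsert, hq, ih]

lemma scanInsert_length (bset : PySem.Set Int) (num : Int) : ∀ printed : List Int,
    (scanInsert bset num printed).length = printed.length + 1 := by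
  intro printed
  induction printed with
  | nil => simp [scanInsert]
  | cons p rest ih =>
    simp only [scanInsert]
    split
    · simp
    · simp [ih]

-- the per-element steps agree whenever printed is no longer than A's sentinel
lemma step_core (printed befores : List Int) (num : Int)
    (hlen : printed.length ≤ 100000000000) :
    (if minFold printed 100000000000 befores = 100000000000 then printed ++ [num]
     else PySem.List.insert printed (minFold printed 100000000000 befores) num)
      = (if PySem.Set.ofList befores = [] then printed ++ [num]
         else scanInsert (PySem.Set.ofList befores) num printed) := by
  by_cases hbe : PySem.Set.ofList befores = []
  · have hempty : ∀ b, b ∉ befores := by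
      intro b hb
      have : b ∈ PySem.Set.ofList befores := (PySem.Set.mem_ofList befores b).mpr hb
      simp [hbe] at this
    have hnone : minFold printed 100000000000 befores = 100000000000 := by
      rcases minFold_cases printed befores 100000000000 with h | ⟨b, hb, _, _⟩
      · exact h
      · exact absurd hb (hempty b)
    simp [hnone, hbe]
  rw [if_neg hbe, scanInsert_eq]
  cases hf : printed.findIdx? (fun x => decide (x ∈ PySem.Set.ofList befores)) with
  | none =>
    rw [List.findIdx?_eq_none_iff] at hf
    have hnone : minFold printed 100000000000 befores = 100000000000 := by
      rcases minFold_cases printed befores 100000000000 with h | ⟨b, hb, hp, _⟩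
      · exact h
      · have := hf b hp
        simp [PySem.Set.mem_ofList] at this
        exact absurd hb this
    simp [hnone]
  | some k =>
    rw [List.findIdx?_eq_some_iff_getElem] at hf
    obtain ⟨hk, h1, h2⟩ := hf
    obtain ⟨hfirst, hlb⟩ := pvIdx_first printed (fun x => decide (x ∈ PySem.Set.ofList befores)) k hk h1 h2
    have hbmem : printed[k] ∈ befores := by
      have := of_decide_eq_true h1
      exact (PySem.Set.mem_ofList befores _).mp this
    have hub : minFold printed 100000000000 befores ≤ (k : Int) := by
      rw [← hfirst]
      exact minFold_le_mem printed befores _ _ hbmem (List.getElem_mem hk)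
    have hklt : (k : Int) < 100000000000 := by
      have : k < printed.length := hk
      omega
    have hr : minFold printed 100000000000 befores = (k : Int) := by
      rcases minFold_cases printed befores 100000000000 with h | ⟨b, hb, hp, h⟩
      · omega
      · have := hlb b hp (decide_eq_true ((PySem.Set.mem_ofList befores b).mpr hb))
        omega
    rw [if_neg (by omega), hr, PySem.List.insert_natCast printed k num (by omega)]

lemma fold_eq (order : List (Int × List Int)) : ∀ (nums printed : List Int),
    printed.length + nums.length ≤ 100000000000 →
    nums.foldl (stepA order) printed = nums.foldl (stepB order) printed := by
  intro nums
  induction nums with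
  | nil => intro printed _; rfl
  | cons num rest ih =>
    intro printed hlen
    simp only [List.foldl_cons]
    have hstep : stepA order printed num = stepB order printed num := by
      show (if minFold printed 100000000000 (PySem.Dict.getD (PySem.Dict.mk order) num []) = 100000000000
            then printed ++ [num]
            else PySem.List.insert printed (minFold printed 100000000000 (PySem.Dict.getD (PySem.Dict.mk order) num [])) num)
          = stepB order printed num
      exact step_core printed _ num (by simp at hlen; omega)
    rw [hstep]
    apply ih
    have : (stepB order printed num).length = printed.length + 1 := by
      simp only [stepB]
      split
      · simp
      · exact scanInsert_length _ _ _
    simp at hlen ⊢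
    omega

-- ===== VERDICT (by name: the statement is the Claim_ definition above) =====
theorem order_list_spec : Claim_equal_order_list := by
  intro nums order _ hpre
  show order_list nums order = order_list_alt nums order
  show nums.foldl (stepA order) [] = nums.foldl (stepB order) []
  exact fold_eq order nums [] (by simpa [Pre_order_list] using hpre)
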